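-- pv_equiv track=rewrite | github.com/saketchopra/hiiii | app.py | encode_badges
-- ===== SOURCE A (Python) =====
-- def encode_badges(user_id, badges_dict):
--     sorted_badge_names = sorted(badges_dict.keys())
--     badges_number = 0
--     for badge_name in sorted_badge_names:
--         if user_id in badges_dict[badge_name]:
--             badge_index = sorted_badge_names.index(badge_name)
--             power_of_2 = 2**badge_index
--             badges_number |= power_of_2
--     return badges_number
-- ===== SOURCE B (Python) =====
-- def encode_badges(user_id, badges_dict):
--     # No sorting: the bit position of a badge equals the number of badge
--     # names strictly smaller than it, so rank each key by counting and
--     # sum the corresponding powers of two.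
--     total = 0
--     for name, members in badges_dict.items():
--         if user_id in members:
--             rank = sum(1 for other in badges_dict if other < name)
--             total += 2 ** rank
--     return total
-- ===== Notes on version B (the rewrite author's own statement) =====
-- stated objective: alternative
-- what changed: B never sorts: it iterates the dict items in insertion order, computes each hit badge's bit position as the count of strictly smaller keys (order statistics by counting), and adds 2**rank arithmetically, where A sorts the keys, rescans with list.index for each hit and ORs isolated powers.
import Mathlib
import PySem

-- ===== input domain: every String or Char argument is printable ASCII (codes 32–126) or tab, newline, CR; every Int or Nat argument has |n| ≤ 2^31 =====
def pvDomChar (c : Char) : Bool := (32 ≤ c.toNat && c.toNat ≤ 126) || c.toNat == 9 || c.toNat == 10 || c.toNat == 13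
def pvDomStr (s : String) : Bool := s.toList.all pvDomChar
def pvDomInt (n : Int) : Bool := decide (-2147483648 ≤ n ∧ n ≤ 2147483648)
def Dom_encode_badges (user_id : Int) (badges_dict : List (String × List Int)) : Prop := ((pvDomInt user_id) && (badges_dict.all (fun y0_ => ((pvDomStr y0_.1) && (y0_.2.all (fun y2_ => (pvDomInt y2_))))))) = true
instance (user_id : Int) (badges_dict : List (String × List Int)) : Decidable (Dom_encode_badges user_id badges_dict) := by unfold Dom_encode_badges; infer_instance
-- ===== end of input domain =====

-- B avoids sorting entirely: it iterates the dict items in insertion order, computes each hit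
-- badge's bit position as the count of strictly smaller keys, and sums 2^rank arithmetically,
-- instead of A's sort + per-hit list.index scan + bitwise OR (objective: alternative algorithm).


-- ===== PORT A =====
def encode_badges (user_id : Int) (badges_dict : List (String × List Int)) : Int :=
  let d := PySem.Dict.mk badges_dict
  let sorted_badge_names := PySem.List.sorted d.keys (fun x => x) false
  sorted_badge_names.foldl (fun badges_number badge_name =>
    if user_id ∈ (d.get? badge_name).getD [] then
      -- badge_name comes from the dict's keys, so badges_dict[badge_name] cannot raise
      -- and list.index always finds it: get? is some, index? is some (getD defaults unused)
      let badge_index := (PySem.List.index? sorted_badge_names badge_name).getD 0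
      let power_of_2 : Int := 2 ^ badge_index
      PySem.Int.bor badges_number power_of_2
    else badges_number) 0

-- ===== PORT B =====
def encode_badges_alt (user_id : Int) (badges_dict : List (String × List Int)) : Int :=
  let d := PySem.Dict.mk badges_dict
  d.items.foldl (fun total p =>
    if user_id ∈ p.2 then
      -- sum(1 for other in badges_dict if other < name) is the count of smaller keys
      total + 2 ^ (d.keys.countP (fun other => decide (other < p.1)))
    else total) 0

-- ===== PRECONDITION & SPEC =====
-- Pre_ requires pairwise-distinct keys in the association list: a Python dict cannot hold
-- duplicate keys, so a duplicate-keyed list does not represent any dict input of A.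
def Pre_encode_badges (user_id : Int) (badges_dict : List (String × List Int)) : Prop :=
  (badges_dict.map Prod.fst).Nodup
instance (user_id : Int) (badges_dict : List (String × List Int)) : Decidable (Pre_encode_badges user_id badges_dict) := by unfold Pre_encode_badges; infer_instance
def pvWitness_encode_badges : Int × (List (String × List Int)) := (1, [("a", [1]), ("b", [])])
def Spec_encode_badges (user_id : Int) (badges_dict : List (String × List Int)) (out : Int) : Prop := out = encode_badges_alt user_id badges_dict
instance (user_id : Int) (badges_dict : List (String × List Int)) (out : Int) : Decidable (Spec_encode_badges user_id badges_dict out) := by unfold Spec_encode_badges; infer_instance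

-- ===== CLAIM (what is proved, stated in full; the proofs are below) =====
def Claim_equal_encode_badges : Prop := ∀ (user_id : Int) (badges_dict : List (String × List Int)), Dom_encode_badges user_id badges_dict → Pre_encode_badges user_id badges_dict → Spec_encode_badges user_id badges_dict (encode_badges user_id badges_dict)

-- ===== LEMMAS AND PROOFS =====

-- value of a little-endian bit list
def pvVal : List Int → Int
  | [] => 0
  | b :: t => b + 2 * pvVal t

theorem pvVal_nonneg (l : List Int) (h : ∀ b ∈ l, 0 ≤ b) : 0 ≤ pvVal l := by
  induction l with
  | nil => simp [pvVal]
  | cons b t ih =>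
    have hb := h b (by simp)
    have ht := ih (fun x hx => h x (by simp [hx]))
    simp only [pvVal]; positivity

theorem pv_natkey (k m : Nat) : 2^k ||| 2^(k+1)*m = 2^k + 2^(k+1)*m := by
  induction k generalizing m with
  | zero =>
    have h := Nat.lor_bit true 0 false m
    simp [Nat.bit] at h
    simpa [pow_succ, Nat.add_comm] using h
  | succ k ih =>
    have h := Nat.lor_bit false (2^k) false (2^(k+1)*m)
    simp [Nat.bit] at h
    have e1 : (2:Nat)^(k+1) = 2*(2^k) := by ring
    have e2 : (2:Nat)^(k+1+1)*m = 2*(2^(k+1)*m) := by ring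
    rw [e1, e2, h, ih]; ring

theorem pv_intkey (k : Nat) (m : Int) (hm : 0 ≤ m) :
    PySem.Int.bor (2^k) (2^(k+1)*m) = 2^k + 2^(k+1)*m := by
  obtain ⟨n, rfl⟩ := Int.eq_ofNat_of_zero_le hm
  have h1 : ((2:Int)^k) = ((2^k : Nat) : Int) := by push_cast; ring
  have h2 : ((2:Int)^(k+1)*n) = ((2^(k+1)*n : Nat) : Int) := by push_cast; ring
  rw [h1, h2, PySem.Int.bor_natCast, pv_natkey]
  push_cast; ring

theorem pv_bor_nonneg {a b : Int} (ha : 0 ≤ a) (hb : 0 ≤ b) : 0 ≤ PySem.Int.bor a b := by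
  rw [PySem.Int.bor_of_nonneg ha hb]
  exact Int.natCast_nonneg _

theorem pv_zero_bor (a : Int) : PySem.Int.bor 0 a = a := by
  rw [PySem.Int.bor_comm]; exact PySem.Int.bor_zero a

theorem pv_bor_assoc {a b c : Int} (ha : 0 ≤ a) (hb : 0 ≤ b) (hc : 0 ≤ c) :
    PySem.Int.bor (PySem.Int.bor a b) c = PySem.Int.bor a (PySem.Int.bor b c) := by
  obtain ⟨x, rfl⟩ := Int.eq_ofNat_of_zero_le ha
  obtain ⟨y, rfl⟩ := Int.eq_ofNat_of_zero_le hb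
  obtain ⟨z, rfl⟩ := Int.eq_ofNat_of_zero_le hc
  simp only [PySem.Int.bor_natCast, Nat.lor_assoc]

-- one step of A's loop: accumulate the badge's power of two (g = membership test,
-- pw = the power 2^index computed from the fixed sorted list)
def pvStep (g : String → Bool) (pw : String → Int) (acc : Int) (n : String) : Int :=
  if g n then PySem.Int.bor acc (pw n) else acc

theorem pvFold_nonneg (g : String → Bool) (pw : String → Int) (hpw : ∀ n, 0 ≤ pw n) :
    ∀ (l : List String) (acc : Int), 0 ≤ acc → 0 ≤ l.foldl (pvStep g pw) acc := by
  intro l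
  induction l with
  | nil => intro acc h; simpa using h
  | cons n t ih =>
    intro acc h
    refine ih _ ?_
    unfold pvStep
    split
    · exact pv_bor_nonneg h (hpw n)
    · exact h

theorem pvFold_pull (g : String → Bool) (pw : String → Int) (hpw : ∀ n, 0 ≤ pw n) :
    ∀ (l : List String) (acc : Int), 0 ≤ acc →
      l.foldl (pvStep g pw) acc = PySem.Int.bor acc (l.foldl (pvStep g pw) 0) := by
  intro l
  induction l with
  | nil => intro acc _; simp [PySem.Int.bor_zero]
  | cons n t ih =>
    intro acc hacc
    have hs0 : 0 ≤ pvStep g pw 0 n := by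
      unfold pvStep; split
      · exact pv_bor_nonneg le_rfl (hpw n)
      · exact le_rfl
    have hsacc : 0 ≤ pvStep g pw acc n := by
      unfold pvStep; split
      · exact pv_bor_nonneg hacc (hpw n)
      · exact hacc
    have hstep : pvStep g pw acc n = PySem.Int.bor acc (pvStep g pw 0 n) := by
      unfold pvStep; split
      · rw [pv_zero_bor]
      · rw [PySem.Int.bor_zero]
    calc (n :: t).foldl (pvStep g pw) acc
        = t.foldl (pvStep g pw) (pvStep g pw acc n) := by simp [List.foldl]
      _ = PySem.Int.bor (pvStep g pw acc n) (t.foldl (pvStep g pw) 0) := ih _ hsacc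
      _ = PySem.Int.bor (PySem.Int.bor acc (pvStep g pw 0 n)) (t.foldl (pvStep g pw) 0) := by
            rw [hstep]
      _ = PySem.Int.bor acc (PySem.Int.bor (pvStep g pw 0 n) (t.foldl (pvStep g pw) 0)) :=
            pv_bor_assoc hacc hs0 (pvFold_nonneg g pw hpw t 0 le_rfl)
      _ = PySem.Int.bor acc (t.foldl (pvStep g pw) (pvStep g pw 0 n)) := by
            rw [← ih _ hs0]
      _ = PySem.Int.bor acc ((n :: t).foldl (pvStep g pw) 0) := by simp [List.foldl]

theorem pvBits_nonneg (g : String → Bool) (l : List String) :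
    ∀ b ∈ l.map (fun n => if g n then (1:Int) else 0), 0 ≤ b := by
  intro b hb
  simp only [List.mem_map] at hb
  obtain ⟨n, _, rfl⟩ := hb
  split <;> norm_num

-- A's fold over a suffix of the nodup sorted list s, with offset pre.length
theorem pvAfold (g : String → Bool) :
    ∀ (suf pre s : List String), s = pre ++ suf → s.Nodup →
      suf.foldl (pvStep g (fun n => (2:Int) ^ ((PySem.List.index? s n).getD 0))) 0
        = 2 ^ pre.length * pvVal (suf.map (fun n => if g n then (1:Int) else 0)) := by
  intro suf
  induction suf with
  | nil => intro pre s _ _; simp [pvVal]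
  | cons n t ih =>
    intro pre s hs hnd
    set pw : String → Int := fun n => (2:Int) ^ ((PySem.List.index? s n).getD 0) with hpwdef
    have hpw : ∀ m, 0 ≤ pw m := fun m => by positivity
    have hidx : PySem.List.index? s n = some pre.length := by
      rw [PySem.List.index?_eq_some_iff]
      refine ⟨pre, t, hs, rfl, ?_⟩
      intro hmem
      rw [hs] at hnd
      exact (List.disjoint_of_nodup_append hnd) hmem (by simp)
    have hIH := ih (pre ++ [n]) s (by simp [hs]) hnd
    have hm : 0 ≤ pvVal (t.map (fun n => if g n then (1:Int) else 0)) :=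
      pvVal_nonneg _ (pvBits_nonneg g t)
    have hlen : (pre ++ [n]).length = pre.length + 1 := by simp
    rw [hlen] at hIH
    have hfold : (n :: t).foldl (pvStep g pw) 0
        = PySem.Int.bor (pvStep g pw 0 n) (t.foldl (pvStep g pw) 0) := by
      have hs0 : 0 ≤ pvStep g pw 0 n := by
        unfold pvStep; split
        · exact pv_bor_nonneg le_rfl (hpw n)
        · exact le_rfl
      calc (n :: t).foldl (pvStep g pw) 0
          = t.foldl (pvStep g pw) (pvStep g pw 0 n) := by simp [List.foldl]
        _ = PySem.Int.bor (pvStep g pw 0 n) (t.foldl (pvStep g pw) 0) :=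
            pvFold_pull g pw hpw t _ hs0
    rw [hfold, hIH]
    by_cases hg : g n
    · have hstep : pvStep g pw 0 n = 2 ^ pre.length := by
        unfold pvStep
        rw [if_pos hg, pv_zero_bor, hpwdef]
        simp only [hidx, Option.getD_some]
      rw [hstep, pv_intkey _ _ hm]
      simp [pvVal, hg]
      ring
    · have hstep : pvStep g pw 0 n = 0 := by unfold pvStep; rw [if_neg hg]
      rw [hstep, pv_zero_bor]
      simp [pvVal, hg]
      ring

-- B's summand: 2^rank for a hit, 0 otherwise
def pvTerm (g : String → Bool) (r : String → Nat) (n : String) : Int :=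
  if g n then 2 ^ r n else 0

theorem pv_foldl_add_eq_sum (f : String × List Int → Int) :
    ∀ (l : List (String × List Int)) (a : Int),
      l.foldl (fun acc p => acc + f p) a = a + (l.map f).sum := by
  intro l
  induction l with
  | nil => intro a; simp
  | cons p t ih => intro a; simp [List.foldl, ih]; ring

-- position in a strictly increasing list = number of smaller elements
theorem pv_countP_lt (pre t : List String) (n : String)
    (h : (pre ++ n :: t).Pairwise (· < ·)) :
    (pre ++ n :: t).countP (fun o => decide (o < n)) = pre.length := by
  rw [List.countP_append]
  have hpre : ∀ o ∈ pre, o < n := by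
    intro o ho
    exact (List.pairwise_append.mp h).2.2 o ho n (by simp)
  have h1 : pre.countP (fun o => decide (o < n)) = pre.length := by
    rw [List.countP_eq_length]
    intro o ho; simpa using hpre o ho
  have h2 : (n :: t).countP (fun o => decide (o < n)) = 0 := by
    rw [List.countP_eq_zero]
    intro o ho
    rcases List.mem_cons.mp ho with rfl | hot
    · simp
    · have : n < o := (List.pairwise_cons.mp (List.pairwise_append.mp h).2.1).1 o hot
      simp [not_lt_of_gt this]
  omega

-- the Horner value of the bit vector over a strictly increasing list s equals the
-- sum of 2^(count of smaller elements) over its hits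
theorem pvBsum (g : String → Bool) :
    ∀ (suf pre s : List String), s = pre ++ suf → s.Pairwise (· < ·) →
      ((suf.map (pvTerm g (fun n => s.countP (fun o => decide (o < n))))).sum
        = 2 ^ pre.length * pvVal (suf.map (fun n => if g n then (1:Int) else 0))) := by
  intro suf
  induction suf with
  | nil => intro pre s _ _; simp [pvVal]
  | cons n t ih =>
    intro pre s hs hp
    have hcnt : s.countP (fun o => decide (o < n)) = pre.length := by
      rw [hs]; exact pv_countP_lt pre t n (hs ▸ hp)
    have hIH := ih (pre ++ [n]) s (by simp [hs]) hp
    have hlen : (pre ++ [n]).length = pre.length + 1 := by simp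
    rw [hlen] at hIH
    simp only [List.map_cons, List.sum_cons, hIH, pvVal]
    unfold pvTerm
    simp only [hcnt]
    by_cases hg : g n <;> simp [hg] <;> ring

-- ===== VERDICT (by name: the statement is the Claim_ definition above) =====
theorem encode_badges_spec : Claim_equal_encode_badges := by
  intro user_id badges_dict _ hpre
  unfold Spec_encode_badges encode_badges encode_badges_alt
  simp only []
  set d := PySem.Dict.mk badges_dict with hd
  set s := PySem.List.sorted d.keys (fun x => x) false with hsdef
  set g : String → Bool := fun n => decide (user_id ∈ (d.get? n).getD []) with hg
  have hkeys : d.keys = badges_dict.map Prod.fst := by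
    simp [hd, PySem.Dict.keys_mk]
  have hndk : d.keys.Nodup := by rw [hkeys]; exact hpre
  have hperm : s.Perm d.keys := PySem.List.sorted_perm d.keys (fun x => x) false
  have hnd : s.Nodup := hperm.symm.nodup hndk
  have hple : s.Pairwise (fun a b => a ≤ b) := PySem.List.sorted_pairwise d.keys (fun x => x)
  have hplt : s.Pairwise (· < ·) := by
    have := List.Pairwise.and hple hnd
    exact this.imp (fun ⟨h1, h2⟩ => lt_of_le_of_ne h1 h2)
  -- rank function: count of strictly smaller keys (same counted over s or over d.keys)
  set r : String → Nat := fun n => d.keys.countP (fun o => decide (o < n)) with hr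
  have hrs : ∀ n, s.countP (fun o => decide (o < n)) = r n := by
    intro n; rw [hr]; exact hperm.countP_eq _
  -- A's side: the bor-fold over the sorted list is the Horner value of the bit vector
  have hA := pvAfold g s [] s (by simp) hnd
  simp only [List.length_nil, pow_zero, one_mul] at hA
  have hfunA : (fun (badges_number : Int) badge_name =>
        if user_id ∈ (d.get? badge_name).getD [] then
          PySem.Int.bor badges_number
            ((2:Int) ^ ((PySem.List.index? s badge_name).getD 0))
        else badges_number)
      = pvStep g (fun n => (2:Int) ^ ((PySem.List.index? s n).getD 0)) := by
    funext acc n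
    unfold pvStep
    by_cases h : user_id ∈ (d.get? n).getD [] <;> simp [hg, h]
  -- B's side: the additive fold over the items is the sum of pvTerm over the keys
  have hterm : ∀ (acc : Int), ∀ p ∈ d.items,
      (if user_id ∈ p.2 then
        acc + 2 ^ (d.keys.countP (fun other => decide (other < p.1)))
      else acc) = acc + pvTerm g r p.1 := by
    intro acc p hp
    obtain ⟨k, v⟩ := p
    have hget : d.get? k = some v := PySem.Dict.get?_of_mem_items d hp hndk
    unfold pvTerm
    by_cases h : user_id ∈ v <;> simp [hg, hget, h, hr]
  have hB : d.items.foldl (fun total p =>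
        if user_id ∈ p.2 then
          total + 2 ^ (d.keys.countP (fun other => decide (other < p.1)))
        else total) 0
      = (d.keys.map (pvTerm g r)).sum := by
    have h1 : d.items.foldl (fun total p =>
          if user_id ∈ p.2 then
            total + 2 ^ (d.keys.countP (fun other => decide (other < p.1)))
          else total) 0
        = d.items.foldl (fun total p => total + pvTerm g r p.1) 0 := by
      apply PySem.List.foldl_congr_mem
      intro acc p hp
      exact hterm acc p hp
    rw [h1, pv_foldl_add_eq_sum (fun p => pvTerm g r p.1) d.items 0]
    simp only [PySem.Dict.keys, List.map_map]
    ring_nf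
    rfl
  rw [hfunA, hA, hB]
  calc pvVal (s.map (fun n => if g n then (1:Int) else 0))
      = (s.map (pvTerm g (fun n => s.countP (fun o => decide (o < n))))).sum := by
        have := pvBsum g s [] s (by simp) hplt
        simp only [List.length_nil, pow_zero, one_mul] at this
        exact this.symm
    _ = (s.map (pvTerm g r)).sum := by
        congr 1
        exact List.map_congr_left (fun n _ => by unfold pvTerm; simp only [hrs])
    _ = (d.keys.map (pvTerm g r)).sum := (hperm.map (pvTerm g r)).sum_eq
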